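-- pv_equiv track=rewrite | github.com/jmoehler/bachelor_thesis_public | q2_helper.py | only_first_falls
-- ===== SOURCE A (Python) =====
-- def only_first_falls(departments, point_of_interest):
--     out = []
--
--     for i, dep in enumerate(departments):
--         if dep == point_of_interest:
--             out.append(dep)
--             if i+1 < len(departments):
--                 out.append('(1)')
--             break
--         else:
--             out.append(dep)
--
--     return out
-- ===== SOURCE B (Python) =====
-- def only_first_falls(departments, point_of_interest):
--     try:
--         i = departments.index(point_of_interest)
--     except ValueError:
--         return list(departments)
--     out = list(departments[:i+1])
--     if i + 1 < len(departments):
--         out.append('(1)')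
--     return out
-- ===== Notes on version B (the rewrite author's own statement) =====
-- stated objective: simpler
-- what changed: Replaces the element-by-element accumulate-and-break loop with a locate-then-slice decomposition: find the first match with list.index, copy the prefix by slicing, and append '(1)' only when the match is not last.
import Mathlib
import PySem

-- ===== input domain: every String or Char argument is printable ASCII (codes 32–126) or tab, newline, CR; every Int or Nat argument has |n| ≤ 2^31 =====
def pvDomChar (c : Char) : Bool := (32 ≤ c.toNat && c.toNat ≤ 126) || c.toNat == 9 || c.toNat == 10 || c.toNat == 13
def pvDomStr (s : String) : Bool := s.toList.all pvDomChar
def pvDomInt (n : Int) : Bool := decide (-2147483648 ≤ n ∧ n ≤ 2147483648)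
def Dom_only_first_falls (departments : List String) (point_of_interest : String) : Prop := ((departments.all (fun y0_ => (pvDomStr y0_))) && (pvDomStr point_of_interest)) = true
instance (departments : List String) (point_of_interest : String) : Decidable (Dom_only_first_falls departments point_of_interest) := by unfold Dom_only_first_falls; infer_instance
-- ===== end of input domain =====

-- B replaces A's accumulate-and-break loop with a locate-then-slice decomposition (objective: simpler).

-- ===== PORT A =====
-- A's for-loop over enumerate(departments) with break: structural recursion carrying the
-- running index i and the fixed total length, emitting elements as A appends them.
def oafLoopA (poi : String) (len : Nat) : Nat → List String → List String
  | _, [] => []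
  | i, d :: ds =>
    if d == poi then
      d :: (if i + 1 < len then ["(1)"] else [])
    else
      d :: oafLoopA poi len (i + 1) ds

def only_first_falls (departments : List String) (point_of_interest : String) : List String :=
  oafLoopA point_of_interest departments.length 0 departments

-- ===== PORT B =====
def only_first_falls_alt (departments : List String) (point_of_interest : String) : List String :=
  match PySem.List.index? departments point_of_interest with
  | none => departments
  | some i =>
    let out := PySem.List.slice departments none (some ((i : Int) + 1))
    if i + 1 < departments.length then out ++ ["(1)"] else out

-- ===== PRECONDITION & SPEC =====
def Spec_only_first_falls (departments : List String) (point_of_interest : String) (out : List String) : Prop := out = only_first_falls_alt departments point_of_interest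
instance (departments : List String) (point_of_interest : String) (out : List String) : Decidable (Spec_only_first_falls departments point_of_interest out) := by unfold Spec_only_first_falls; infer_instance

-- ===== CLAIM (what is proved, stated in full; the proofs are below) =====
def Claim_equal_only_first_falls : Prop := ∀ (departments : List String) (point_of_interest : String), Dom_only_first_falls departments point_of_interest → Spec_only_first_falls departments point_of_interest (only_first_falls departments point_of_interest)

-- ===== LEMMAS AND PROOFS =====

-- Closed form of A's loop: prefix up to and including the first match, plus '(1)' when
-- the match is not at the last position (measured against the fixed length `len`).
theorem oafLoopA_eq (poi : String) (ds : List String) (len i : Nat)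
    (h : i + ds.length = len) :
    oafLoopA poi len i ds =
      match PySem.List.index? ds poi with
      | none => ds
      | some k => ds.take (k + 1) ++ (if i + k + 1 < len then ["(1)"] else []) := by
  induction ds generalizing i with
  | nil => simp [oafLoopA, PySem.List.index?_eq_idxOf?]
  | cons d ds ih =>
    by_cases hd : d = poi
    · subst hd
      rw [PySem.List.index?_cons_self]
      simp only [oafLoopA, beq_self_eq_true, if_true, List.take_succ_cons, List.take_zero]
      simp
    · have hne : (d == poi) = false := beq_false_of_ne hd
      rw [PySem.List.index?_cons_of_ne ds hd]
      simp only [oafLoopA, hne]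
      rw [ih (i + 1) (by simpa [Nat.add_comm, Nat.add_left_comm] using h)]
      cases hk : PySem.List.index? ds poi with
      | none => simp
      | some k =>
        simp only [Option.map_some]
        have : i + 1 + k + 1 = i + (k + 1) + 1 := by omega
        simp [this]

-- ===== VERDICT (by name: the statement is the Claim_ definition above) =====
theorem only_first_falls_spec : Claim_equal_only_first_falls := by
  intro ds poi _
  unfold Spec_only_first_falls only_first_falls only_first_falls_alt
  rw [oafLoopA_eq poi ds ds.length 0 (by omega)]
  cases hk : PySem.List.index? ds poi with
  | none => simp
  | some k =>
    have hs : PySem.List.slice ds none (some ((k : Int) + 1)) = ds.take (k + 1) := by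
      have : ((k : Int) + 1) = ((k + 1 : Nat) : Int) := by push_cast; ring
      rw [this, PySem.List.slice_to_natCast]
    simp only [hs]
    by_cases hlt : k + 1 < ds.length <;> simp [hlt]
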